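-- pv_equiv track=rewrite | github.com/sanjayBala/mini-url | main/parser.py | encodeUrl
-- ===== SOURCE A (Python) =====
-- def encodeUrl(id):
--     """
--         Converts ID to a short URL
--     """
--     characters = "0123456789abcdefghijklmnopqrstuvwxyzABCDEFGHIJKLMNOPQRSTUVWXYZ"
--     # base = 62
--     base = len(characters)
--     ret = []
--     while id > 0:
--         val = id % base
--         ret.append(characters[val])
--         id = id // base
--     # reverse and return
--     return "".join(ret[::-1])
-- ===== SOURCE B (Python) =====
-- def encodeUrl(id):
--     """Converts ID to a short URL: find the largest power of the base not
--     exceeding id, then emit digits most-significant first (no reverse)."""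
--     characters = "0123456789abcdefghijklmnopqrstuvwxyzABCDEFGHIJKLMNOPQRSTUVWXYZ"
--     base = len(characters)
--     if id <= 0:
--         return ""
--     p = 1
--     while p * base <= id:
--         p *= base
--     out = []
--     while p > 0:
--         out.append(characters[(id // p) % base])
--         p //= base
--     return "".join(out)
-- ===== Notes on version B (the rewrite author's own statement) =====
-- stated objective: alternative
-- what changed: Instead of collecting least-significant digits in a list and reversing, B first finds the largest power of the base not exceeding id and then emits digits most-significant first by dividing by decreasing powers, so no reversal is performed.
import Mathlib
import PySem

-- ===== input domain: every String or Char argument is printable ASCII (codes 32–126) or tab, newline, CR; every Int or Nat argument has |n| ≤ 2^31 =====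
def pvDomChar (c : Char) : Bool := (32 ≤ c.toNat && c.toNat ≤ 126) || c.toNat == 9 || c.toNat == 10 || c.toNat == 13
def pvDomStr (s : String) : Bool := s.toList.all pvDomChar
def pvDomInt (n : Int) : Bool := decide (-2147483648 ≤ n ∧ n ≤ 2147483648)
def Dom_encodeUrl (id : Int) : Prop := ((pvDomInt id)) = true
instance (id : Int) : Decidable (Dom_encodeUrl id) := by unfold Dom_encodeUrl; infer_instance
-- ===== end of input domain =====

-- B finds the largest power of 62 not exceeding id and emits digits
-- most-significant first, so no accumulate-then-reverse is needed (alternative algorithm).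

-- ===== PORT A =====
-- characters = "0123456789abcdefghijklmnopqrstuvwxyzABCDEFGHIJKLMNOPQRSTUVWXYZ" as a char list
def encodeUrlChars : List Char :=
  "0123456789abcdefghijklmnopqrstuvwxyzABCDEFGHIJKLMNOPQRSTUVWXYZ".toList

-- termination helper: id // 62 shrinks for positive id (used by A's loop and B's second loop)
lemma encodeUrl_div_toNat_lt (id : Int) (h : 0 < id) :
    (PySem.Int.floordiv id (encodeUrlChars.length : Int)).toNat < id.toNat := by
  have h62 : (0:Int) < (encodeUrlChars.length : Int) := by decide
  rw [PySem.Int.floordiv_eq_ediv_of_pos h62]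
  have hlen : (encodeUrlChars.length : Int) = 62 := by decide
  rw [hlen]
  have h1 := Int.mul_ediv_add_emod id 62
  have h2 := Int.emod_nonneg id (by decide : (62:Int) ≠ 0)
  have h3 := Int.emod_lt_of_pos id (by decide : (0:Int) < 62)
  omega

-- the while-loop of A: state is (id, ret); characters[val] is in range since 0 ≤ id % 62 < 62,
-- so pyGetD is exact here (Python never raises in this loop)
def encodeUrlLoop (id : Int) (ret : List Char) : List Char :=
  if h : 0 < id then
    encodeUrlLoop (PySem.Int.floordiv id (encodeUrlChars.length : Int))
      (ret ++ [PySem.List.pyGetD encodeUrlChars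
                 (PySem.Int.mod id (encodeUrlChars.length : Int)) '0'])
  else ret
termination_by id.toNat
decreasing_by
  exact encodeUrl_div_toNat_lt id h

-- "".join(ret[::-1]) : ret is a list of single chars, so this is exactly the reversed string
def encodeUrl (id : Int) : String :=
  String.ofList ((encodeUrlLoop id []).reverse)

-- ===== PORT B =====
-- 'while p * base <= id: p *= base' — the '0 < p' conjunct only ensures termination;
-- Source B only reaches this loop with p = 1, where it is vacuously true on every iteration
def encodeUrlPow (id p : Int) : Int :=
  if h : p * (encodeUrlChars.length : Int) ≤ id ∧ 0 < p then
    encodeUrlPow id (p * (encodeUrlChars.length : Int))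
  else p
termination_by (id.toNat + 1) - p.toNat
decreasing_by
  obtain ⟨h1, h2⟩ := h
  have hlen : (encodeUrlChars.length : Int) = 62 := by decide
  rw [hlen] at h1 ⊢
  have : p + 1 ≤ p * 62 := by nlinarith
  generalize hq : p * 62 = q at *
  omega

-- 'while p > 0: out.append(characters[(id // p) % base]); p //= base'
def encodeUrlEmit (id p : Int) (out : List Char) : List Char :=
  if h : 0 < p then
    encodeUrlEmit id (PySem.Int.floordiv p (encodeUrlChars.length : Int))
      (out ++ [PySem.List.pyGetD encodeUrlChars
                 (PySem.Int.mod (PySem.Int.floordiv id p) (encodeUrlChars.length : Int)) '0'])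
  else out
termination_by p.toNat
decreasing_by
  exact encodeUrl_div_toNat_lt p h

def encodeUrl_alt (id : Int) : String :=
  if id ≤ 0 then "" else
    String.ofList (encodeUrlEmit id (encodeUrlPow id 1) [])

-- ===== PRECONDITION & SPEC =====
def Spec_encodeUrl (id : Int) (out : String) : Prop := out = encodeUrl_alt id
instance (id : Int) (out : String) : Decidable (Spec_encodeUrl id out) := by unfold Spec_encodeUrl; infer_instance

-- ===== CLAIM =====
def Claim_equal_encodeUrl : Prop := ∀ (id : Int), Dom_encodeUrl id → Spec_encodeUrl id (encodeUrl id)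

-- ===== LEMMAS AND PROOFS =====
-- canonical digit string, most-significant digit first
def msdDigits (id : Int) : List Char :=
  if h : 0 < id then
    msdDigits (PySem.Int.floordiv id (encodeUrlChars.length : Int)) ++
      [PySem.List.pyGetD encodeUrlChars (PySem.Int.mod id (encodeUrlChars.length : Int)) '0']
  else []
termination_by id.toNat
decreasing_by
  exact encodeUrl_div_toNat_lt id h

-- digits emitted by B's second loop, as a pure list function of the starting power
def powDigits (id p : Int) : List Char :=
  if h : 0 < p then
    PySem.List.pyGetD encodeUrlChars
        (PySem.Int.mod (PySem.Int.floordiv id p) (encodeUrlChars.length : Int)) '0' ::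
      powDigits id (PySem.Int.floordiv p (encodeUrlChars.length : Int))
  else []
termination_by p.toNat
decreasing_by
  exact encodeUrl_div_toNat_lt p h

lemma encodeUrl_len62 : (encodeUrlChars.length : Int) = 62 := by decide

lemma encodeUrlLoop_eq (n : Nat) : ∀ (id : Int), id.toNat ≤ n → ∀ (ret : List Char),
    encodeUrlLoop id ret = ret ++ (msdDigits id).reverse := by
  induction n with
  | zero =>
    intro id hle ret
    have hnp : ¬ 0 < id := by omega
    rw [encodeUrlLoop, msdDigits]
    simp [hnp]
  | succ n ih =>
    intro id hle ret
    by_cases h : 0 < id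
    · have hlt := encodeUrl_div_toNat_lt id h
      have hle' : (PySem.Int.floordiv id (encodeUrlChars.length : Int)).toNat ≤ n := by omega
      rw [encodeUrlLoop, msdDigits]
      simp only [h, dif_pos]
      rw [ih _ hle']
      simp
    · rw [encodeUrlLoop, msdDigits]
      simp [h]

lemma encodeUrlEmit_eq (n : Nat) : ∀ (p : Int), p.toNat ≤ n → ∀ (id : Int) (out : List Char),
    encodeUrlEmit id p out = out ++ powDigits id p := by
  induction n with
  | zero =>
    intro p hle id out
    have hnp : ¬ 0 < p := by omega
    rw [encodeUrlEmit, powDigits]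
    simp [hnp]
  | succ n ih =>
    intro p hle id out
    by_cases h : 0 < p
    · have hlt := encodeUrl_div_toNat_lt p h
      have hle' : (PySem.Int.floordiv p (encodeUrlChars.length : Int)).toNat ≤ n := by omega
      rw [encodeUrlEmit, powDigits]
      simp only [h, dif_pos]
      rw [ih _ hle']
      simp
    · rw [encodeUrlEmit, powDigits]
      simp [h]

lemma encodeUrlPow_spec (m : Nat) : ∀ (p id : Int), (id.toNat + 1) - p.toNat ≤ m → 0 < p → p ≤ id →
    ∃ j : Nat, encodeUrlPow id p = p * 62 ^ j ∧ encodeUrlPow id p ≤ id ∧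
      id < encodeUrlPow id p * 62 := by
  induction m with
  | zero =>
    intro p id hm hp hpid
    exfalso
    omega
  | succ m ih =>
    intro p id hm hp hpid
    rw [encodeUrlPow, encodeUrl_len62]
    by_cases h : p * 62 ≤ id
    · have hp' : 0 < p * 62 := by positivity
      have hmeas : (id.toNat + 1) - (p * 62).toNat ≤ m := by
        have : p + 1 ≤ p * 62 := by nlinarith
        generalize hq : p * 62 = q at *
        omega
      obtain ⟨j, hj1, hj2, hj3⟩ := ih (p * 62) id hmeas hp' h
      refine ⟨j + 1, ?_, ?_, ?_⟩
      · simp only [h, hp, and_self, reduceDIte]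
        rw [hj1]; ring
      · simpa [h, hp] using hj2
      · simpa [h, hp] using hj3
    · refine ⟨0, ?_, ?_, ?_⟩ <;> simp [h, hp] <;> omega

-- id // (62 * q) = (id // 62) // q for positive q
lemma encodeUrl_div_div (id q : Int) (hq : 0 < q) :
    id / (62 * q) = id / 62 / q := by
  exact (Int.ediv_ediv_of_nonneg (by omega : (0:Int) ≤ 62)).symm

lemma powDigits_one (id : Int) :
    powDigits id 1 = [PySem.List.pyGetD encodeUrlChars
      (PySem.Int.mod id (encodeUrlChars.length : Int)) '0'] := by
  rw [powDigits]
  simp only [show (0:Int) < 1 by omega, reduceDIte]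
  have h1 : PySem.Int.floordiv (1:Int) (encodeUrlChars.length : Int) = 0 := by decide
  have h2 : PySem.Int.floordiv id 1 = id := by
    rw [PySem.Int.floordiv_eq_ediv_of_pos (by omega)]; exact Int.ediv_one id
  rw [h1, h2, powDigits]
  norm_num

lemma powDigits_shift (m : Nat) : ∀ (id : Int),
    powDigits id (62 ^ (m + 1)) =
      powDigits (PySem.Int.floordiv id (encodeUrlChars.length : Int)) (62 ^ m) ++
        [PySem.List.pyGetD encodeUrlChars (PySem.Int.mod id (encodeUrlChars.length : Int)) '0'] := by
  induction m with
  | zero =>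
    intro id
    simp only [zero_add, pow_one, pow_zero]
    rw [powDigits]
    simp only [show (0:Int) < 62 by omega, reduceDIte, encodeUrl_len62]
    rw [show PySem.Int.floordiv (62:Int) 62 = 1 by decide, powDigits_one, powDigits_one]
    simp [encodeUrl_len62]
  | succ m ih =>
    intro id
    conv_lhs => rw [powDigits]
    have hpos : (0:Int) < 62 ^ (m + 2) := by positivity
    simp only [hpos, reduceDIte, encodeUrl_len62]
    have hdiv : PySem.Int.floordiv ((62:Int) ^ (m + 2)) 62 = 62 ^ (m + 1) := by
      rw [PySem.Int.floordiv_eq_ediv_of_pos (by omega)]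
      rw [pow_succ' (62:Int) (m+1)]
      rw [Int.mul_ediv_cancel_left _ (by omega)]
    rw [hdiv, ih id]
    conv_rhs => rw [powDigits]
    have hpos' : (0:Int) < 62 ^ (m + 1) := by positivity
    simp only [hpos', reduceDIte, encodeUrl_len62]
    have hdiv' : PySem.Int.floordiv ((62:Int) ^ (m + 1)) 62 = 62 ^ m := by
      rw [PySem.Int.floordiv_eq_ediv_of_pos (by omega)]
      rw [pow_succ' (62:Int) m]
      rw [Int.mul_ediv_cancel_left _ (by omega)]
    rw [hdiv']
    have hhead : PySem.Int.floordiv id ((62:Int) ^ (m + 2)) =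
        PySem.Int.floordiv (PySem.Int.floordiv id 62) ((62:Int) ^ (m + 1)) := by
      rw [PySem.Int.floordiv_eq_ediv_of_pos (by positivity),
          PySem.Int.floordiv_eq_ediv_of_pos (by omega),
          PySem.Int.floordiv_eq_ediv_of_pos (by positivity)]
      rw [pow_succ' (62:Int) (m+1), encodeUrl_div_div id _ (by positivity)]
    rw [hhead]
    simp

lemma powDigits_eq_msdDigits (n : Nat) : ∀ (id : Int), id.toNat ≤ n → 0 < id →
    ∀ (j : Nat), 62 ^ j ≤ id → id < 62 ^ (j + 1) → powDigits id (62 ^ j) = msdDigits id := by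
  induction n with
  | zero =>
    intro id hle hpos
    omega
  | succ n ih =>
    intro id hle hpos j hlo hhi
    rw [msdDigits]
    simp only [hpos, reduceDIte]
    cases j with
    | zero =>
      have hid62 : id < 62 := by simpa using hhi
      have hq0 : PySem.Int.floordiv id (encodeUrlChars.length : Int) = 0 := by
        rw [encodeUrl_len62, PySem.Int.floordiv_eq_ediv_of_pos (by omega)]
        apply Int.ediv_eq_zero_of_lt <;> omega
      rw [hq0]
      rw [powDigits]
      norm_num
      rw [powDigits]
      norm_num
      rw [encodeUrl_len62, PySem.Int.floordiv_eq_ediv_of_pos (by omega)]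
      rw [msdDigits]
      norm_num
    | succ j' =>
      rw [powDigits_shift j' id]
      congr 1
      set id' := PySem.Int.floordiv id (encodeUrlChars.length : Int) with hid'
      have hid'e : id' = id / 62 := by
        rw [hid', encodeUrl_len62, PySem.Int.floordiv_eq_ediv_of_pos (by omega)]
      have hle62 : (62:Int) ≤ 62 ^ (j' + 1) := by
        calc (62:Int) = 62 ^ 1 := (pow_one _).symm
        _ ≤ 62 ^ (j' + 1) := pow_le_pow_right₀ (by omega) (by omega)
      have h62le : (62:Int) ≤ id := le_trans hle62 hlo
      have hpos' : 0 < id' := by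
        rw [hid'e]
        have : (1:Int) ≤ id / 62 := by
          rw [Int.le_ediv_iff_mul_le (by omega : (0:Int) < 62)]; omega
        omega
      have hlo' : (62:Int) ^ j' ≤ id' := by
        rw [hid'e, Int.le_ediv_iff_mul_le (by omega : (0:Int) < 62)]
        calc (62:Int) ^ j' * 62 = 62 ^ (j' + 1) := by ring
        _ ≤ id := hlo
      have hhi' : id' < 62 ^ (j' + 1) := by
        rw [hid'e, Int.ediv_lt_iff_lt_mul (by omega : (0:Int) < 62)]
        calc id < 62 ^ (j' + 1 + 1) := hhi
        _ = 62 ^ (j' + 1) * 62 := by ring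
      have hlt : id'.toNat ≤ n := by
        have := encodeUrl_div_toNat_lt id hpos
        rw [← hid'] at this
        omega
      exact ih id' hlt hpos' j' hlo' hhi'

-- ===== VERDICT =====
theorem encodeUrl_spec : Claim_equal_encodeUrl := by
  intro id _
  unfold Spec_encodeUrl encodeUrl encodeUrl_alt
  rw [encodeUrlLoop_eq id.toNat id le_rfl []]
  by_cases hpos : 0 < id
  · simp only [show ¬ id ≤ 0 by omega, if_false]
    rw [encodeUrlEmit_eq (encodeUrlPow id 1).toNat _ le_rfl]
    obtain ⟨j, hj1, hj2, hj3⟩ := encodeUrlPow_spec (id.toNat + 1) 1 id (by omega) (by omega) (by omega)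
    rw [hj1] at hj2 hj3 ⊢
    simp only [one_mul] at hj2 hj3 ⊢
    rw [powDigits_eq_msdDigits id.toNat id le_rfl hpos j hj2 (by calc id < 62 ^ j * 62 := hj3
      _ = 62 ^ (j + 1) := by ring)]
    simp
  · rw [msdDigits]
    simp [hpos, show id ≤ 0 by omega]
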